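-- pv_equiv track=rewrite | github.com/twezo1337/optimal-processing-sequence | method_functions.py | rec2_sokol
-- ===== SOURCE A (Python) =====
-- import copy
--
-- def rec2_sokol(matr):
--     r = []
--     sum = []
--
--     for i in range(len(matr[0])):
--         temp_sum = 0
--         for j in range(len(matr)):
--             if j == 0:
--                 pass
--             else:
--                 temp_sum += matr[j][i]
--         sum.append(temp_sum)
--
--     sumcopy = copy.deepcopy(sum)
--     sumcopy.sort()
--     sumcopy.reverse()
--
--     for i in sumcopy:
--         for j in range(len(sum)):
--             if i == sum[j]:
--                 r.append(j)
--
--     r = list(dict.fromkeys(r))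
--
--     return r
-- ===== SOURCE B (Python) =====
-- def rec2_sokol(matr):
--     colsum = [sum(row[i] for row in matr[1:]) for i in range(len(matr[0]))]
--     groups = {}
--     for i, s in enumerate(colsum):
--         groups[s] = groups.get(s, []) + [i]
--     r = []
--     for s in sorted(groups, reverse=True):
--         r.extend(groups[s])
--     return r
-- ===== Notes on version B (the rewrite author's own statement) =====
-- stated objective: alternative
-- what changed: B builds the column sums once, groups column indices by sum in a single dict pass, and emits the groups by descending key, replacing A's sort-with-duplicates, per-value full rescans of the sum list and final dict.fromkeys dedup.
import Mathlib
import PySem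

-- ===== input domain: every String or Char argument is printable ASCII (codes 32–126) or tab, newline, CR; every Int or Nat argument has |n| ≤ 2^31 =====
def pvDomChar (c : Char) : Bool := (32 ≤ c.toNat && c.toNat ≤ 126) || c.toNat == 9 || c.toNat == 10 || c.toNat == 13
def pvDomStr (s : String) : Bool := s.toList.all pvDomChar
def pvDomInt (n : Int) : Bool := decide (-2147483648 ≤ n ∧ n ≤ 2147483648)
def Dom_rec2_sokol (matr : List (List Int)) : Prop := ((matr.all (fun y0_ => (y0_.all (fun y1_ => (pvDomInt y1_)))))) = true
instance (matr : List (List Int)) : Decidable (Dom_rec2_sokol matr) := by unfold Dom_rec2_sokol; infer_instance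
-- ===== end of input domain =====

-- B groups column indices by their column sum in one dict pass and emits the groups by
-- descending key, replacing A's per-value rescans of the sum list and the final dedup
-- (objective: alternative — O(n·m + k log k) grouping instead of A's O(n²) scan phase).

-- ===== PORT A =====
def rec2_sokol (matr : List (List Int)) : List Int :=
  -- sum[i] = Σ_{j≥1} matr[j][i]
  let sum := (PySem.List.pyRange 0 (PySem.List.len (PySem.List.pyGetD matr 0 [])) 1).foldl
    (fun sum i =>
      let temp_sum := (PySem.List.pyRange 0 (PySem.List.len matr) 1).foldl
        (fun t j => if j = 0 then t
                    else t + PySem.List.pyGetD (PySem.List.pyGetD matr j []) i 0) 0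
      sum ++ [temp_sum]) []
  -- sumcopy = sorted ascending, then reversed
  let sumcopy := (PySem.List.sorted sum (fun x => x) false).reverse
  -- for i in sumcopy: for j in range(len(sum)): if i == sum[j]: r.append(j)
  let r := sumcopy.foldl (fun r i =>
      (PySem.List.pyRange 0 (PySem.List.len sum) 1).foldl
        (fun r j => if i = PySem.List.pyGetD sum j 0 then r ++ [j] else r) r) []
  -- r = list(dict.fromkeys(r))
  PySem.List.dedup r

-- ===== PORT B =====
def rec2_sokol_alt (matr : List (List Int)) : List Int :=
  -- colsum = [sum(row[i] for row in matr[1:]) for i in range(len(matr[0]))]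
  let colsum := (PySem.List.pyRange 0 (PySem.List.len (PySem.List.pyGetD matr 0 [])) 1).map
    (fun i => ((PySem.List.slice matr (some 1) none).map
                 (fun row => PySem.List.pyGetD row i 0)).sum)
  -- for i, s in enumerate(colsum): groups[s] = groups.get(s, []) + [i]
  let groups := (PySem.List.enumerate colsum).foldl
    (fun d p => d.modify p.2 [] (fun l => l ++ [p.1])) PySem.Dict.empty
  -- for s in sorted(groups, reverse=True): r.extend(groups[s])
  (PySem.List.sorted groups.keys (fun x => x) true).foldl
    (fun r s => r ++ groups.getD s []) []

-- ===== PRECONDITION & SPEC =====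
-- Pre_ excludes exactly the inputs where Python A raises IndexError: the empty matrix
-- (matr[0]) and matrices with a row shorter than row 0 (matr[j][i]).
def Pre_rec2_sokol (matr : List (List Int)) : Prop :=
  matr ≠ [] ∧ ∀ row ∈ matr, matr.headI.length ≤ row.length
instance (matr : List (List Int)) : Decidable (Pre_rec2_sokol matr) := by
  unfold Pre_rec2_sokol; infer_instance
def pvWitness_rec2_sokol : List (List Int) := [[1, 2], [3, 4], [5, 4]]

def Spec_rec2_sokol (matr : List (List Int)) (out : List Int) : Prop := out = rec2_sokol_alt matr
instance (matr : List (List Int)) (out : List Int) : Decidable (Spec_rec2_sokol matr out) := by unfold Spec_rec2_sokol; infer_instance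

-- ===== CLAIM (what is proved, stated in full; the proofs are below) =====
def Claim_equal_rec2_sokol : Prop := ∀ (matr : List (List Int)), Dom_rec2_sokol matr → Pre_rec2_sokol matr → Spec_rec2_sokol matr (rec2_sokol matr)

-- ===== LEMMAS AND PROOFS =====

-- the common column-sum list both ports compute
def pvColSums (matr : List (List Int)) : List Int :=
  (PySem.List.pyRange 0 (PySem.List.len (PySem.List.pyGetD matr 0 [])) 1).map
    (fun i => ((matr.drop 1).map (fun row => PySem.List.pyGetD row i 0)).sum)

-- ascending indices j of xs with xs[j] = v
def pvIdx (xs : List Int) (v : Int) : List Int :=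
  (PySem.List.pyRange 0 (PySem.List.len xs) 1).filter
    (fun j => PySem.List.pyGetD xs j 0 == v)

theorem pvOfList_sublist {α : Type} [BEq α] [LawfulBEq α] (xs : List α) :
    (PySem.Set.ofList xs).Sublist xs := by
  induction xs with
  | nil => simp [PySem.Set.ofList, PySem.Set.empty]
  | cons x xs ih =>
      rw [PySem.Set.ofList_cons]
      exact List.Sublist.cons₂ x (List.Sublist.trans (by simp [PySem.Set.discard]) ih)

theorem pvIdx_nodup (xs : List Int) (v : Int) : (pvIdx xs v).Nodup := by
  exact List.Nodup.filter _ (PySem.List.nodup_pyRange_one 0 (PySem.List.len xs))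

theorem pvIdx_disjoint (xs : List Int) (v w : Int) (hvw : v ≠ w) :
    ∀ x, x ∈ pvIdx xs v → x ∉ pvIdx xs w := by
  intro x hv hw
  simp only [pvIdx, List.mem_filter, beq_iff_eq] at hv hw
  exact hvw (hv.2 ▸ hw.2 ▸ rfl)

-- dedup commutes with a flatMap over nodup, pairwise-disjoint blocks
theorem pvDedup_flatMap (g : Int → List Int) (hg : ∀ v, (g v).Nodup)
    (hdisj : ∀ v w, v ≠ w → ∀ x, x ∈ g v → x ∉ g w) :
    ∀ l : List Int, PySem.Set.ofList (l.flatMap g) = (PySem.Set.ofList l).flatMap g := by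
  intro l
  induction l with
  | nil => simp [PySem.Set.ofList, PySem.Set.empty]
  | cons x l ih =>
      have haux : ∀ m : List Int,
          m.flatMap (fun v => (g v).filter
            (fun y => !(PySem.Set.contains (PySem.Set.ofList (g x)) y)))
          = (m.filter (fun v => !(v == x))).flatMap g := by
        intro m
        induction m with
        | nil => simp
        | cons v m ihm =>
            rw [List.flatMap_cons, List.filter_cons]
            by_cases hvx : v = x
            · subst hvx
              have h1 : (g v).filter
                  (fun y => !(PySem.Set.contains (PySem.Set.ofList (g v)) y)) = [] := by
                apply List.filter_eq_nil_iff.mpr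
                intro y hy
                rw [(PySem.Set.contains_iff _ _).2 ((PySem.Set.mem_ofList _ _).2 hy)]
                simp
              rw [h1, ihm]
              simp
            · have h1 : (g v).filter
                  (fun y => !(PySem.Set.contains (PySem.Set.ofList (g x)) y)) = g v := by
                apply List.filter_eq_self.mpr
                intro y hy
                have hnx : y ∉ g x := fun hx => hdisj v x hvx y hy hx
                have hc : PySem.Set.contains (PySem.Set.ofList (g x)) y = false :=
                  Bool.eq_false_iff.mpr (fun hc =>
                    hnx ((PySem.Set.mem_ofList _ _).1 ((PySem.Set.contains_iff _ _).1 hc)))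
                rw [hc]
                simp
              rw [h1, ihm]
              simp [hvx]
      calc PySem.Set.ofList ((x :: l).flatMap g)
          = PySem.Set.update (PySem.Set.ofList (g x)) (l.flatMap g) := by
            rw [List.flatMap_cons, PySem.Set.ofList_append]
        _ = PySem.Set.ofList (g x) ++ (PySem.Set.ofList (l.flatMap g)).filter
              (fun y => !(PySem.Set.contains (PySem.Set.ofList (g x)) y)) :=
            PySem.Set.update_eq_append_filter _ _
        _ = g x ++ ((PySem.Set.ofList l).flatMap g).filter
              (fun y => !(PySem.Set.contains (PySem.Set.ofList (g x)) y)) := by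
            rw [ih]
            congr 1
            exact PySem.Set.ofList_eq_self_of_nodup _ (hg x)
        _ = g x ++ ((PySem.Set.ofList l).filter (fun v => !(v == x))).flatMap g := by
            rw [List.filter_flatMap, haux]
        _ = (PySem.Set.ofList (x :: l)).flatMap g := by
            rw [PySem.Set.ofList_cons]; rfl

-- reverse of the ascending sort is sorted(· , reverse=True) for the identity key
theorem pvSortedRev (xs : List Int) :
    (PySem.List.sorted xs (fun x => x) false).reverse = PySem.List.sorted xs (fun x => x) true := by
  have h : PySem.List.sorted xs (fun x => x) false
      = (PySem.List.sorted xs (fun x => x) true).reverse := by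
    apply PySem.List.eq_of_perm_of_pairwise_le_of_injective (fun x : Int => x)
      (fun a b h => h)
    · exact (PySem.List.sorted_perm xs _ false).trans
        ((PySem.List.sorted_perm xs _ true).symm.trans (List.reverse_perm _).symm)
    · exact PySem.List.sorted_pairwise xs _
    · rw [List.pairwise_reverse]
      exact PySem.List.sorted_pairwise_rev xs _
  rw [h, List.reverse_reverse]

-- dedup of the descending sort is the descending sort of the dedup
theorem pvOfListSortedRev (xs : List Int) :
    PySem.Set.ofList (PySem.List.sorted xs (fun x => x) true)
      = PySem.List.sorted (PySem.Set.ofList xs) (fun x => x) true := by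
  apply Eq.symm
  apply PySem.List.sorted_rev_eq_of_perm_of_pairwise_gt
  · rw [List.perm_ext_iff_of_nodup (PySem.Set.nodup_ofList _) (PySem.Set.nodup_ofList _)]
    intro a
    rw [PySem.Set.mem_ofList, PySem.Set.mem_ofList, PySem.List.mem_sorted]
  · have hle : (PySem.Set.ofList (PySem.List.sorted xs (fun x => x) true)).Pairwise
        (fun a b : Int => b ≤ a) :=
      (PySem.List.sorted_pairwise_rev xs _).sublist (pvOfList_sublist _)
    have hne : (PySem.Set.ofList (PySem.List.sorted xs (fun x => x) true)).Pairwise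
        (fun a b : Int => a ≠ b) := PySem.Set.nodup_ofList _
    exact (hle.and hne).imp (fun {a b} h => lt_of_le_of_ne h.1 (Ne.symm h.2))

-- A reduces to: flatten the index blocks of the descending dup-sort, then dedup
set_option maxRecDepth 4096 in
theorem pvA_char (matr : List (List Int)) (h : matr ≠ []) :
    rec2_sokol matr
      = (PySem.List.sorted (PySem.Set.ofList (pvColSums matr)) (fun x => x) true).flatMap
          (pvIdx (pvColSums matr)) := by
  have hm : (0 : Int) < PySem.List.len matr := by
    simp only [PySem.List.len_eq]
    exact_mod_cast List.length_pos_iff.mpr h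
  have hinner : ∀ i : Int,
      (PySem.List.pyRange 0 (PySem.List.len matr) 1).foldl
        (fun t j => if j = 0 then t
                    else t + PySem.List.pyGetD (PySem.List.pyGetD matr j []) i 0) 0
      = ((matr.drop 1).map (fun row => PySem.List.pyGetD row i 0)).sum := by
    intro i
    rw [PySem.List.pyRange_one_cons hm]
    simp only [List.foldl_cons, if_true]
    rw [PySem.List.foldl_congr_mem _ _
      (fun t j => t + PySem.List.pyGetD (PySem.List.pyGetD matr j []) i 0) _
      (by
        intro acc j hj
        have h1 : (0 : Int) + 1 ≤ j := (PySem.List.mem_pyRange_one.mp hj).1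
        rw [if_neg (by omega)])]
    rw [PySem.List.foldl_add _
      (fun j => PySem.List.pyGetD (PySem.List.pyGetD matr j []) i 0)]
    rw [show (fun j => PySem.List.pyGetD (PySem.List.pyGetD matr j []) i 0)
        = (fun row => PySem.List.pyGetD row i 0) ∘ (fun j => PySem.List.pyGetD matr j []) from rfl]
    rw [← List.map_map, PySem.List.map_pyGetD_pyRange matr [] (by norm_num : (0:Int) ≤ 0 + 1)]
    norm_num
  have hsum : (PySem.List.pyRange 0 (PySem.List.len (PySem.List.pyGetD matr 0 [])) 1).foldl
      (fun sum i =>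
        sum ++ [(PySem.List.pyRange 0 (PySem.List.len matr) 1).foldl
          (fun t j => if j = 0 then t
                      else t + PySem.List.pyGetD (PySem.List.pyGetD matr j []) i 0) 0]) []
      = pvColSums matr := by
    rw [PySem.List.foldl_append_singleton_eq_map]
    unfold pvColSums
    rw [List.nil_append]
    exact List.map_congr_left (fun i _ => hinner i)
  have hloop : ∀ (xs : List Int) (r : List Int) (i : Int),
      (PySem.List.pyRange 0 (PySem.List.len xs) 1).foldl
        (fun r j => if i = PySem.List.pyGetD xs j 0 then r ++ [j] else r) r
      = r ++ pvIdx xs i := by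
    intro xs r i
    rw [PySem.List.foldl_append_ite_eq_filter (fun j => i = PySem.List.pyGetD xs j 0)]
    unfold pvIdx
    congr 1
    apply List.filter_congr
    intro j _
    rw [Bool.eq_iff_iff]
    simp only [beq_iff_eq, decide_eq_true_eq]
    exact eq_comm
  unfold rec2_sokol
  rw [hsum]
  show PySem.List.dedup
      (((PySem.List.sorted (pvColSums matr) (fun x => x) false).reverse).foldl
        (fun r i =>
          (PySem.List.pyRange 0 (PySem.List.len (pvColSums matr)) 1).foldl
            (fun r j => if i = PySem.List.pyGetD (pvColSums matr) j 0 then r ++ [j] else r) r) [])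
      = _
  rw [PySem.List.foldl_congr_mem _ _
      (fun (r : List Int) (i : Int) => r ++ pvIdx (pvColSums matr) i) _
      (fun r i _ => hloop (pvColSums matr) r i)]
  rw [PySem.List.foldl_append_eq_flatMap, List.nil_append, pvSortedRev,
    PySem.List.dedup_eq_ofList,
    pvDedup_flatMap _ (pvIdx_nodup _) (pvIdx_disjoint _),
    pvOfListSortedRev]

-- B reduces to the same expression
set_option maxHeartbeats 1000000 in
theorem pvB_char (matr : List (List Int)) :
    rec2_sokol_alt matr
      = (PySem.List.sorted (PySem.Set.ofList (pvColSums matr)) (fun x => x) true).flatMap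
          (pvIdx (pvColSums matr)) := by
  have hcs : (PySem.List.pyRange 0 (PySem.List.len (PySem.List.pyGetD matr 0 [])) 1).map
      (fun i => ((PySem.List.slice matr (some 1) none).map
                   (fun row => PySem.List.pyGetD row i 0)).sum)
      = pvColSums matr := by
    unfold pvColSums
    rw [PySem.List.slice_from_one, ← List.drop_one]
  unfold rec2_sokol_alt
  rw [hcs]
  simp only []
  generalize pvColSums matr = xs
  have hswap : (PySem.List.enumerate xs).foldl
      (fun d p => d.modify p.2 [] (fun l => l ++ [p.1])) PySem.Dict.empty
      = ((PySem.List.enumerate xs).map Prod.swap).foldl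
          (fun d q => d.modify q.1 [] (fun l => l ++ [q.2])) PySem.Dict.empty := by
    rw [List.foldl_map]
    rfl
  have hkeys : ((PySem.List.enumerate xs).foldl
      (fun d p => d.modify p.2 [] (fun l => l ++ [p.1])) PySem.Dict.empty).keys
      = PySem.Set.ofList xs := by
    rw [PySem.Dict.keys_foldl_modify_key (PySem.List.enumerate xs) (fun p => p.2) []
      (fun _ p => fun l => l ++ [p.1]) PySem.Dict.empty]
    rw [PySem.Dict.keys_empty, PySem.List.map_snd_enumerate, PySem.Set.update_nil_left]
  have hgetD : ∀ v : Int, ((PySem.List.enumerate xs).foldl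
      (fun d p => d.modify p.2 [] (fun l => l ++ [p.1])) PySem.Dict.empty).getD v []
      = pvIdx xs v := by
    intro v
    rw [hswap, PySem.Dict.getD_foldl_modify_append]
    rw [PySem.Dict.getD_empty, List.nil_append, List.filter_map, List.map_map]
    show ((PySem.List.enumerate xs).filter (fun p => p.2 == v)).map (fun p => p.1)
        = pvIdx xs v
    rw [PySem.List.enumerate_eq_map_pyRange xs 0, List.filter_map, List.map_map]
    show ((PySem.List.pyRange 0 (PySem.List.len xs) 1).filter
        (fun j => PySem.List.pyGetD xs j 0 == v)).map id = pvIdx xs v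
    rw [List.map_id]
    rfl
  rw [PySem.List.foldl_congr_mem _ _
      (fun (r : List Int) (s : Int) => r ++ pvIdx xs s) _
      (fun r s _ => by rw [hgetD s])]
  rw [PySem.List.foldl_append_eq_flatMap, List.nil_append, hkeys]

-- ===== VERDICT (by name: the statement is the Claim_ definition above) =====
theorem rec2_sokol_spec : Claim_equal_rec2_sokol := by
  intro matr _ hpre
  unfold Spec_rec2_sokol
  rw [pvA_char matr hpre.1, pvB_char matr]
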